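-- pv_equiv track=rewrite | github.com/brickee/HarveyNER | data_utils_cur_loc.py | maximum_entity_length
-- ===== SOURCE A (Python) =====
-- def maximum_entity_length(labels):
--     best = 0
--     current = 0
--     for label in labels:
--         if label == 'O':
--             best = max(current, best)
--             current = 0
--         else:
--             current += 1
--     best = max(current, best)
--     return best
-- ===== SOURCE B (Python) =====
-- def maximum_entity_length(labels):
--     # run-extraction decomposition: scan to the end of each non-'O' run, take max of run lengths
--     best = 0
--     i = 0
--     n = len(labels)
--     while i < n:
--         if labels[i] == 'O':
--             i += 1
--         else:
--             j = i
--             while j < n and labels[j] != 'O':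
--                 j += 1
--             best = max(best, j - i)
--             i = j
--     return best
-- ===== Notes on version B (the rewrite author's own statement) =====
-- stated objective: alternative
-- what changed: Replaces A's single running counter with reset-on-'O' by a run-extraction decomposition: an outer scan skips 'O's and an inner scan measures each maximal non-'O' run, taking the max of run lengths.
import Mathlib
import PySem

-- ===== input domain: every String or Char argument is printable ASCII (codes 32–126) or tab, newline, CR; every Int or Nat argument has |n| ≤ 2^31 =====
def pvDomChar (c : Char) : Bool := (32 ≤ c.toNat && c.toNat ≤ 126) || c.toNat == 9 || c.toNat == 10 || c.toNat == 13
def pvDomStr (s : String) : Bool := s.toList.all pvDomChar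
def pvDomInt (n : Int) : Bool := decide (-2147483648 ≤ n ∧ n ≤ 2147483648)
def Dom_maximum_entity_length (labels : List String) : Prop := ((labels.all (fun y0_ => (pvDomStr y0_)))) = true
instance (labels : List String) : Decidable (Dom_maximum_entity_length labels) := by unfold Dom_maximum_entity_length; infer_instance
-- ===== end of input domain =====

-- B replaces A's running counter (reset on 'O') by run extraction: skip 'O's, measure each maximal
-- non-'O' run with an inner scan, and take the max of the run lengths (objective: alternative).

-- ===== PORT A =====
-- A: single pass with (best, current); 'O' folds current into best and resets it.
def maximum_entity_length (labels : List String) : Int :=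
  let p := labels.foldl
    (fun (bc : Int × Int) label =>
      if label == "O" then (max bc.2 bc.1, 0) else (bc.1, bc.2 + 1))
    (0, 0)
  max p.2 p.1

-- ===== PORT B =====
-- inner while loop of B: length of the leading non-'O' run
def pvAltRun : List String → Nat
  | [] => 0
  | l :: ls => if l == "O" then 0 else 1 + pvAltRun ls

-- outer while loop of B over the remaining suffix, carrying best
def pvAltGo : List String → Int → Int
  | [], best => best
  | l :: ls, best =>
    if l == "O" then pvAltGo ls best
    else pvAltGo (ls.drop (pvAltRun ls)) (max best ((1 + pvAltRun ls : Nat) : Int))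
termination_by ls _ => ls.length
decreasing_by all_goals simp_all

def maximum_entity_length_alt (labels : List String) : Int := pvAltGo labels 0

-- ===== PRECONDITION & SPEC =====
def Spec_maximum_entity_length (labels : List String) (out : Int) : Prop := out = maximum_entity_length_alt labels
instance (labels : List String) (out : Int) : Decidable (Spec_maximum_entity_length labels out) := by unfold Spec_maximum_entity_length; infer_instance

-- ===== CLAIM (what is proved, stated in full; the proofs are below) =====
def Claim_equal_maximum_entity_length : Prop := ∀ (labels : List String), Dom_maximum_entity_length labels → Spec_maximum_entity_length labels (maximum_entity_length labels)

-- ===== LEMMAS AND PROOFS =====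

-- proof-side characterisation: result of A's scan started with current = c, best discharged
def pvG : List String → Int → Int
  | [], c => c
  | l :: ls, c => if l == "O" then max c (pvG ls 0) else pvG ls (c + 1)

theorem pvG_nonneg : ∀ (ls : List String) (c : Int), 0 ≤ c → 0 ≤ pvG ls c := by
  intro ls
  induction ls with
  | nil => intro c hc; simpa [pvG] using hc
  | cons l ls ih =>
    intro c hc
    simp only [pvG]
    split
    · have := ih 0 le_rfl; omega
    · exact ih (c + 1) (by omega)

theorem pvFold_eq_pvG : ∀ (ls : List String) (b c : Int),
    (let p := ls.foldl
      (fun (bc : Int × Int) label =>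
        if label == "O" then (max bc.2 bc.1, 0) else (bc.1, bc.2 + 1)) (b, c)
     max p.2 p.1) = max (pvG ls c) b := by
  intro ls
  induction ls with
  | nil => intro b c; simp [pvG]
  | cons l ls ih =>
    intro b c
    simp only [List.foldl_cons, pvG]
    split
    · rw [ih]; omega
    · rw [ih]

theorem pvG_run : ∀ (ls : List String) (c : Int), 0 ≤ c →
    pvG ls c = max (c + (pvAltRun ls : Int)) (pvG (ls.drop (pvAltRun ls)) 0) := by
  intro ls
  induction ls with
  | nil => intro c hc; simp [pvG, pvAltRun]; omega
  | cons l ls ih =>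
    intro c hc
    by_cases h : l == "O"
    · simp [pvG, pvAltRun, h]
      have := pvG_nonneg ls 0 le_rfl
      omega
    · simp only [pvG, pvAltRun, h, Bool.false_eq_true, if_false]
      rw [ih (c + 1) (by omega)]
      have hcast : ((1 + pvAltRun ls : Nat) : Int) = 1 + (pvAltRun ls : Int) := by push_cast; ring
      have hdrop : (l :: ls).drop (1 + pvAltRun ls) = ls.drop (pvAltRun ls) := by
        rw [Nat.add_comm]; simp [List.drop_succ_cons]
      rw [hcast, hdrop]
      omega

theorem pvAltGo_eq_pvG : ∀ (ls : List String) (best : Int), 0 ≤ best →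
    pvAltGo ls best = max best (pvG ls 0) := by
  intro ls best
  induction ls, best using pvAltGo.induct with
  | case1 best => intro hb; simp [pvAltGo, pvG]; omega
  | case2 l ls best h ih =>
    intro hb
    have hg := pvG_nonneg ls 0 le_rfl
    simp only [pvAltGo, pvG, h, if_true]
    rw [ih hb]
    omega
  | case3 l ls best h ih =>
    intro hb
    simp only [pvAltGo, pvG, h, Bool.false_eq_true, if_false]
    rw [ih (by positivity)]
    rw [pvG_run ls (0 + 1) (by omega)]
    have hcast : ((1 + pvAltRun ls : Nat) : Int) = 1 + (pvAltRun ls : Int) := by push_cast; ring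
    have hg := pvG_nonneg (ls.drop (pvAltRun ls)) 0 le_rfl
    rw [hcast]
    omega

-- ===== VERDICT (by name: the statement is the Claim_ definition above) =====
theorem maximum_entity_length_spec : Claim_equal_maximum_entity_length := by
  intro labels _
  unfold Spec_maximum_entity_length maximum_entity_length maximum_entity_length_alt
  rw [pvFold_eq_pvG, pvAltGo_eq_pvG labels 0 le_rfl]
  omega
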